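-- pv_equiv track=rewrite | github.com/carlesperez94/frag_pele | Growing/template_fragmenter.py | get_specific_bonds
-- ===== SOURCE A (Python) =====
-- def get_specific_bonds(atoms_dictionary, bonds_dictionary):
--     """
--     :param atoms_dictionary: dictionary with {"PDB atom names" : "index"} of the atoms that we want to get
--     their bond length.
--     :param bonds_dictionary: dictionary {("index_1", "index_2"): "bond length" } to obtain the information.
--     :return: dictionary {("index_1", "index_2"): "bond length" }
--     """
--     # Get indexes of the dictionary with all the atoms
--     atom_indexes = []
--     for atom_name, index in atoms_dictionary.items():
--         atom_indexes.append(index)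
--     # Get indexes of the dictionary with bonding data
--     bonded_indexes = []
--     for bond_indexes, length in bonds_dictionary.items():
--         bonded_indexes.append(bond_indexes)
--     # Create a dictionary where we are going to select the bonds for the atoms of the atom_dictionary
--     selected_bonds_dictionary = {}
--     for index in atom_indexes:
--         for bond in bonded_indexes:
--             # If we want to obtain only bonds that correspond to our atoms dictionary indexes
--             # we have to apply this criteria (bond[1] is the atom that "recives" the bond)
--             if bond[1] == index:
--                 selected_bonds_dictionary[bond] = bonds_dictionary[bond]
--             else:
--                 pass
--     return selected_bonds_dictionary
-- ===== SOURCE B (Python) =====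
-- def get_specific_bonds(atoms_dictionary, bonds_dictionary):
--     # Group the bonds once by their receiving atom (bond[1]), then emit the
--     # groups in the order of the atom indexes: one pass over each dict
--     # instead of A's nested atom-by-bond scan.
--     groups = {}
--     for bond, length in bonds_dictionary.items():
--         groups.setdefault(bond[1], []).append((bond, length))
--     selected_bonds_dictionary = {}
--     for index in atoms_dictionary.values():
--         for bond, length in groups.get(index, ()):
--             selected_bonds_dictionary[bond] = length
--     return selected_bonds_dictionary
-- ===== Notes on version B (the rewrite author's own statement) =====
-- stated objective: faster
-- what changed: B groups the bonds by receiving atom index in one pass and then concatenates the groups in atom order, replacing A's nested atom-outer/bond-inner scan (result dict insertion order is preserved exactly).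
import Mathlib
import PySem

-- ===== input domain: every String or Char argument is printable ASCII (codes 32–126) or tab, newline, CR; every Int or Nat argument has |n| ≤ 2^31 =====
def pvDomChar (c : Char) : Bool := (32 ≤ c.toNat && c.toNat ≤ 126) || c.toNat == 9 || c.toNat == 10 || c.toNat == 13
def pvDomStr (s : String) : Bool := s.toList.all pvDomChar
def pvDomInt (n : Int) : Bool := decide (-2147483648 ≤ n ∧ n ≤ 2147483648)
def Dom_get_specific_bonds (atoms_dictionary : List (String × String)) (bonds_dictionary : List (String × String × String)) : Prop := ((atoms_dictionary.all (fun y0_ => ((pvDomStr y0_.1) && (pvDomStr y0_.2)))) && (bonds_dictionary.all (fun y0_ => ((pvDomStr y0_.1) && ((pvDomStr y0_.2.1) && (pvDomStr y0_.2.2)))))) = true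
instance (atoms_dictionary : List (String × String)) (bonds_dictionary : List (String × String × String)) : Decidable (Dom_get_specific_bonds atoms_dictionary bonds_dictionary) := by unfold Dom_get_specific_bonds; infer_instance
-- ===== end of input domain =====

-- B builds a one-pass index of the bonds grouped by receiving atom and emits the groups in
-- atom order, replacing A's nested atom-outer/bond-inner scan (objective: faster).

-- ===== PORT A =====
-- bonds_dictionary as a PySem.Dict, for the lookup 'bonds_dictionary[bond]'.
-- (the lookup key always comes from the dict's own keys, so getD with a dummy default is
-- exact: the KeyError branch of Python's d[k] is unreachable here)
def pvBondsDict (bonds_dictionary : List (String × String × String)) : PySem.Dict (String × String) String :=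
  PySem.Dict.mk (bonds_dictionary.map (fun b => ((b.1, b.2.1), b.2.2)))

def get_specific_bonds (atoms_dictionary : List (String × String)) (bonds_dictionary : List (String × String × String)) : List (String × String × String) :=
  -- atom_indexes = [] ; for atom_name, index in atoms_dictionary.items(): atom_indexes.append(index)
  let atom_indexes : List String := atoms_dictionary.foldl (fun acc p => acc ++ [p.2]) []
  -- bonded_indexes = [] ; for bond_indexes, length in bonds_dictionary.items(): bonded_indexes.append(bond_indexes)
  let bonded_indexes : List (String × String) := bonds_dictionary.foldl (fun acc b => acc ++ [(b.1, b.2.1)]) []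
  -- selected_bonds_dictionary = {} ; nested loops
  let selected : PySem.Dict (String × String) String :=
    atom_indexes.foldl (fun d index =>
      bonded_indexes.foldl (fun d bond =>
        if bond.2 == index then d.insert bond ((pvBondsDict bonds_dictionary).getD bond "") else d) d)
      PySem.Dict.empty
  selected.items.map (fun p => (p.1.1, p.1.2, p.2))

-- ===== PORT B =====
def get_specific_bonds_alt (atoms_dictionary : List (String × String)) (bonds_dictionary : List (String × String × String)) : List (String × String × String) :=
  -- groups = {} ; for bond, length in bonds_dictionary.items(): groups.setdefault(bond[1], []).append((bond, length))
  let groups : PySem.Dict String (List (String × String × String)) :=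
    bonds_dictionary.foldl (fun g b => g.modify b.2.1 [] (· ++ [b])) PySem.Dict.empty
  -- selected = {} ; for index in atoms_dictionary.values(): for bond, length in groups.get(index, ()): selected[bond] = length
  let selected : PySem.Dict (String × String) String :=
    atoms_dictionary.foldl (fun d p =>
      (groups.getD p.2 []).foldl (fun d b => d.insert (b.1, b.2.1) b.2.2) d)
      PySem.Dict.empty
  selected.items.map (fun p => (p.1.1, p.1.2, p.2))

-- ===== PRECONDITION & SPEC =====
-- Both arguments are Python dicts, so their key lists are duplicate-free; association lists
-- with repeated keys do not represent any input A accepts, and are excluded.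
def Pre_get_specific_bonds (atoms_dictionary : List (String × String)) (bonds_dictionary : List (String × String × String)) : Prop :=
  (atoms_dictionary.map (fun p => p.1)).Nodup ∧ (bonds_dictionary.map (fun b => (b.1, b.2.1))).Nodup
instance (atoms_dictionary : List (String × String)) (bonds_dictionary : List (String × String × String)) : Decidable (Pre_get_specific_bonds atoms_dictionary bonds_dictionary) := by unfold Pre_get_specific_bonds; infer_instance

def pvWitness_get_specific_bonds : (List (String × String)) × (List (String × String × String)) :=
  ([("CA", "2"), ("N", "1")], [("1", "2", "1.47"), ("2", "3", "1.53")])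

def Spec_get_specific_bonds (atoms_dictionary : List (String × String)) (bonds_dictionary : List (String × String × String)) (out : List (String × String × String)) : Prop := out = get_specific_bonds_alt atoms_dictionary bonds_dictionary
instance (atoms_dictionary : List (String × String)) (bonds_dictionary : List (String × String × String)) (out : List (String × String × String)) : Decidable (Spec_get_specific_bonds atoms_dictionary bonds_dictionary out) := by unfold Spec_get_specific_bonds; infer_instance

-- ===== CLAIM (what is proved, stated in full; the proofs are below) =====
def Claim_equal_get_specific_bonds : Prop := ∀ (atoms_dictionary : List (String × String)) (bonds_dictionary : List (String × String × String)), Dom_get_specific_bonds atoms_dictionary bonds_dictionary → Pre_get_specific_bonds atoms_dictionary bonds_dictionary → Spec_get_specific_bonds atoms_dictionary bonds_dictionary (get_specific_bonds atoms_dictionary bonds_dictionary)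

-- ===== LEMMAS AND PROOFS =====

-- B's grouping dict, looked up at idx, is exactly the bonds whose receiving atom is idx.
lemma groups_getD (bonds : List (String × String × String)) (idx : String) :
    (bonds.foldl (fun g b => PySem.Dict.modify g b.2.1 [] (· ++ [b])) PySem.Dict.empty).getD idx []
      = bonds.filter (fun b => b.2.1 == idx) := by
  have h := PySem.Dict.getD_foldl_modify_append (l := bonds.map (fun b => (b.2.1, b)))
    (d := (PySem.Dict.empty : PySem.Dict String (List (String × String × String)))) (c := idx)
  rw [List.foldl_map] at h
  simpa [List.filter_map, Function.comp_def] using h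

-- A's inner loop over the bond keys equals a fold of plain inserts over the filtered bonds.
lemma innerA_eq (bonds : List (String × String × String))
    (hnd : (bonds.map (fun b => (b.1, b.2.1))).Nodup)
    (idx : String) (d : PySem.Dict (String × String) String) :
    (bonds.foldl (fun acc b => acc ++ [(b.1, b.2.1)]) []).foldl
        (fun d bond => if bond.2 == idx then d.insert bond ((pvBondsDict bonds).getD bond "") else d) d
      = (bonds.filter (fun b => b.2.1 == idx)).foldl (fun d b => d.insert (b.1, b.2.1) b.2.2) d := by
  rw [PySem.List.foldl_append_singleton_eq_map, List.nil_append, List.foldl_map,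
    PySem.List.foldl_if_eq_foldl_filter]
  apply PySem.List.foldl_congr_mem
  intro acc b hb
  have hbmem : b ∈ bonds := (List.mem_filter.mp hb).1
  have hitems : ((b.1, b.2.1), b.2.2) ∈ (pvBondsDict bonds).items := by
    simp only [pvBondsDict]
    exact List.mem_map.mpr ⟨b, hbmem, rfl⟩
  have hkeys : (pvBondsDict bonds).keys.Nodup := by
    simpa [pvBondsDict, PySem.Dict.keys, List.map_map, Function.comp] using hnd
  rw [PySem.Dict.getD_of_mem_items _ hitems hkeys]

-- ===== VERDICT (by name: the statement is the Claim_ definition above) =====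
theorem get_specific_bonds_spec : Claim_equal_get_specific_bonds := by
  intro atoms_dictionary bonds_dictionary _hdom hpre
  unfold Spec_get_specific_bonds get_specific_bonds get_specific_bonds_alt
  simp only
  congr 1
  have hidx : atoms_dictionary.foldl (fun acc p => acc ++ [p.2]) [] = atoms_dictionary.map (fun p => p.2) := by
    simpa using PySem.List.foldl_append_singleton_eq_map (l := atoms_dictionary) (f := fun p => p.2) (acc := [])
  rw [hidx, List.foldl_map]
  congr 1
  apply PySem.List.foldl_congr_mem
  intro d p _hp
  rw [groups_getD, innerA_eq bonds_dictionary hpre.2]
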